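/- GENERATED by farm/mkstatement.py from design/units.tsv (unit `decode_all.COMPOSITION`) and the Specs of Vorbis/Spec/*.lean — do not edit.
   THE STATEMENT of the proof unit `decode_all.COMPOSITION`: the function `decode_all` (111 instructions) satisfies its contract,
   GIVEN THE STATEMENTS OF ITS 7 SEGMENTS (`Vorbis.Spec.decode_all.Seg<k> Lay μ u₀`: what the unit `decode_all.<k>` proves).
   No machine code is walked: `ReachVia.trans` along the segments (the exit assertion of a segment is the entry assertion of
   its successor), an induction on the loop measures. What the names mean: Vorbis/Spec/Basic.lean. The theorem to prove:
   `theorem decode_all_COMPOSITION_ok : Vorbis.Spec.decode_all_COMPOSITION.Statement`. -/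
import Vorbis.Spec.DecodeAll
import Vorbis.Spec.Top
namespace Vorbis.Spec.decode_all_COMPOSITION
open X86 X86.User Asan

/-- The statement of unit `decode_all.COMPOSITION`. -/
def Statement : Prop :=
  ∀ (Lay : Layout) (_hLay : Lay.hi = 0x1000000) (μ : Microarch) (_hμ : UserX.MicroOK μ) (u₀ : State)
    (_h_decode_all_1 : Vorbis.Spec.decode_all.Seg1 Lay μ u₀)
    (_h_decode_all_2 : Vorbis.Spec.decode_all.Seg2 Lay μ u₀)
    (_h_decode_all_3 : Vorbis.Spec.decode_all.Seg3 Lay μ u₀)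
    (_h_decode_all_4 : Vorbis.Spec.decode_all.Seg4 Lay μ u₀)
    (_h_decode_all_5 : Vorbis.Spec.decode_all.Seg5 Lay μ u₀)
    (_h_decode_all_6 : Vorbis.Spec.decode_all.Seg6 Lay μ u₀)
    (_h_decode_all_7 : Vorbis.Spec.decode_all.Seg7 Lay μ u₀),
    ∀ (others : List Obj) (frames : List (Nat × FrameLayout)) (len : Nat), Calls Lay μ Vorbis.WayInv (Vorbis.conv u₀) Vorbis.L.decode_all.entry (Vorbis.Spec.decode_all.spec others frames len)

end Vorbis.Spec.decode_all_COMPOSITION
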